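-- pv_equiv track=rewrite | github.com/ITianerU/algorithm | 剑指offer/11_旋转数组的最小数字/python.py | bj
-- ===== SOURCE A (Python) =====
-- def bj(rotateArray):
--     index = 0
--     while len(rotateArray) > 1:
--         if rotateArray[index] > rotateArray[-(index+1)]:
--             return True
--         elif rotateArray[index] == rotateArray[-(index+1)]:
--             if index>= len(rotateArray)//2:
--                 return False
--             index = index + 1
--         else:
--             return False
--     return False
-- ===== SOURCE B (Python) =====
-- def bj(rotateArray):
--     return rotateArray > rotateArray[::-1]
-- ===== Notes on version B (the rewrite author's own statement) =====
-- stated objective: simpler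
-- what changed: Replaces the explicit two-pointer index loop with midpoint cutoff by a single lexicographic comparison of the list against its reversal, which stops at the first asymmetric position.
import Mathlib
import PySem

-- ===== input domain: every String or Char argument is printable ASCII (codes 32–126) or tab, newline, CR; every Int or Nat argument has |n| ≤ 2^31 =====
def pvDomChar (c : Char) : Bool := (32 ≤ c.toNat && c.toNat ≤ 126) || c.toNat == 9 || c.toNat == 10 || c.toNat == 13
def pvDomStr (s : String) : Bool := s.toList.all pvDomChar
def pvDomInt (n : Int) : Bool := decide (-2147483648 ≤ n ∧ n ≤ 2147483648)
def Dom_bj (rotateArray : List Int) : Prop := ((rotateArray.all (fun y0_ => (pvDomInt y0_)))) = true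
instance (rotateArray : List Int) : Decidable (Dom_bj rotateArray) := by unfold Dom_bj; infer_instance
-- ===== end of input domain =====

-- B replaces A's explicit index loop (with midpoint cutoff) by one lexicographic comparison
-- of the list against its reversal (simpler).

-- ===== PORT A =====
-- A's while loop; its state is `index` (len(rotateArray) > 1 is constant across iterations)
def bjLoop (xs : List Int) (index : Nat) : Bool :=
  if xs.length ≤ 1 then false
  else
    match PySem.List.pyGet? xs (index : Int), PySem.List.pyGet? xs (-((index : Int) + 1)) with
    | some a, some b =>
      if a > b then true
      else if a = b then
        if index ≥ xs.length / 2 then false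
        else bjLoop xs (index + 1)
      else false
    | _, _ => false  -- unreachable totalization guard: A only reads in-range indices
termination_by xs.length - index
decreasing_by
  have : index < xs.length / 2 := by omega
  omega

def bj (rotateArray : List Int) : Bool := bjLoop rotateArray 0

-- ===== PORT B =====
-- Python's lexicographic `>` on two int lists
def lexGt : List Int → List Int → Bool
  | [], _ => false
  | _ :: _, [] => true
  | a :: as, b :: bs => if a ≠ b then decide (a > b) else lexGt as bs

-- `rotateArray > rotateArray[::-1]`  (the slice never fails; getD [] is a totalization guard)
def bj_alt (rotateArray : List Int) : Bool :=
  lexGt rotateArray ((PySem.List.slice? rotateArray none none (-1)).getD [])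

-- ===== PRECONDITION & SPEC =====
def Spec_bj (rotateArray : List Int) (out : Bool) : Prop := out = bj_alt rotateArray
instance (rotateArray : List Int) (out : Bool) : Decidable (Spec_bj rotateArray out) := by unfold Spec_bj; infer_instance

-- ===== CLAIM (what is proved, stated in full; the proofs are below) =====
def Claim_equal_bj : Prop := ∀ (rotateArray : List Int), Dom_bj rotateArray → Spec_bj rotateArray (bj rotateArray)

-- ===== LEMMAS AND PROOFS =====
theorem lexGt_self (l : List Int) : lexGt l l = false := by
  induction l with
  | nil => rfl
  | cons a t ih => simp [lexGt, ih]

theorem reverse_getElem? (l : List Int) (i : Nat) (h : i < l.length) :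
    l.reverse[i]? = l[l.length-1-i]? := by
  rw [List.getElem?_eq_getElem (by simpa using h), List.getElem?_eq_getElem (by omega)]
  rw [List.getElem_reverse]

-- if all symmetric pairs up to (and past) the midpoint agree, the list is a palindrome
theorem palindrome_of_half (xs : List Int) (i : Nat)
    (hi : xs.length / 2 ≤ i)
    (hall : ∀ j ≤ i, j < xs.length → xs[j]? = xs.reverse[j]?) : xs.reverse = xs := by
  apply List.ext_getElem?
  intro j
  by_cases hj : j < xs.length
  · by_cases hji : j ≤ i
    · exact (hall j hji hj).symm
    · have h1 : xs.length - 1 - j ≤ i := by omega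
      have := hall (xs.length - 1 - j) h1 (by omega)
      rw [reverse_getElem? _ _ (by omega)] at this
      have h2 : xs.length - 1 - (xs.length - 1 - j) = j := by omega
      rw [h2] at this
      rw [reverse_getElem? _ _ hj, ← this]
  · rw [List.getElem?_eq_none (by simpa using Nat.le_of_not_lt hj),
        List.getElem?_eq_none (by omega)]

-- loop invariant: all symmetric pairs before `i` already agreed
theorem bjLoop_eq_lexGt (xs : List Int) (i : Nat) (hi : i ≤ xs.length / 2)
    (hinv : ∀ j < i, xs[j]? = xs.reverse[j]?) :
    bjLoop xs i = lexGt (xs.drop i) (xs.reverse.drop i) := by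
  by_cases hn : xs.length ≤ 1
  · rw [bjLoop]
    simp only [hn, if_true]
    interval_cases h : xs.length
    · match xs with
      | [] => simp [lexGt]
    · match xs, h with
      | [a], _ =>
        have : i = 0 := by omega
        subst this
        simp [lexGt]
  · have hn2 : 2 ≤ xs.length := by omega
    have hilt : i < xs.length := by omega
    have ha : PySem.List.pyGet? xs (i : Int) = some xs[i] := by
      rw [PySem.List.pyGet?_natCast, List.getElem?_eq_getElem hilt]
    have hmlt : xs.length - 1 - i < xs.length := by omega
    have hb : PySem.List.pyGet? xs (-((i : Int) + 1)) = some xs[xs.length - 1 - i] := by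
      have hcast : (-((i : Int) + 1)) = -(((i+1 : Nat) : Int)) := by push_cast; ring
      rw [hcast, PySem.List.pyGet?_neg_natCast xs (i+1) (by omega) (by omega)]
      have : xs.length - (i+1) = xs.length - 1 - i := by omega
      rw [this, List.getElem?_eq_getElem hmlt]
    have hdA : xs.drop i = xs[i] :: xs.drop (i+1) := List.drop_eq_getElem_cons hilt
    have hdB : xs.reverse.drop i = xs[xs.length - 1 - i] :: xs.reverse.drop (i+1) := by
      rw [List.drop_eq_getElem_cons (by simpa using hilt), List.getElem_reverse]
    rw [bjLoop]
    simp only [hn, if_false, ha, hb, hdA, hdB]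
    by_cases hgt : xs[i] > xs[xs.length - 1 - i]
    · simp [lexGt, hgt, ne_of_gt hgt]
    · by_cases heq : xs[i] = xs[xs.length - 1 - i]
      · rw [if_neg hgt, if_pos heq]
        have hR : lexGt (xs[i] :: xs.drop (i+1)) (xs[xs.length - 1 - i] :: xs.reverse.drop (i+1))
            = lexGt (xs.drop (i+1)) (xs.reverse.drop (i+1)) := by
          simp [lexGt, heq]
        rw [hR]
        have hcur : xs[i]? = xs.reverse[i]? := by
          rw [List.getElem?_eq_getElem hilt, reverse_getElem? _ _ hilt,
              List.getElem?_eq_getElem hmlt, heq]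
        by_cases hhalf : i ≥ xs.length / 2
        · rw [if_pos hhalf]
          have hpal : xs.reverse = xs :=
            palindrome_of_half xs i hhalf (fun j hj hjl => by
              rcases Nat.lt_or_ge j i with h | h
              · exact hinv j h
              · have : j = i := by omega
                subst this; exact hcur)
          rw [hpal, lexGt_self]
        · rw [if_neg hhalf]
          exact bjLoop_eq_lexGt xs (i+1) (by omega)
              (fun j hj => by
                rcases Nat.lt_or_ge j i with h | h
                · exact hinv j h
                · have : j = i := by omega
                  subst this; exact hcur)
      · simp [lexGt, heq, hgt]
termination_by xs.length - i

-- ===== VERDICT (by name: the statement is the Claim_ definition above) =====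
theorem bj_spec : Claim_equal_bj := by
  intro xs _
  unfold Spec_bj bj bj_alt
  rw [PySem.List.slice?_none_none_neg_one]
  simpa using bjLoop_eq_lexGt xs 0 (by omega) (fun j hj => absurd hj (by omega))
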